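-- pv_equiv track=rewrite | github.com/LieutenantCobretti1998/Data-Structures-and-Algorithms | python/list and arrays/min_max_number.py | minMaxGame
-- ===== SOURCE A (Python) =====
-- def minMaxGame(nums: list) -> int:
--     if len(nums) == 1:
--         return nums[0]
--     else:
--         while len(nums) > 1:
--             new_nums = []
--             n = len(nums)
--             for i in range(n // 2):
--                 if i % 2 == 0:
--                     new_nums.append(min(nums[2 * i], nums[2 * i + 1]))
--                 else:
--                     new_nums.append(max(nums[2 * i], nums[2 * i + 1]))
--             nums = new_nums
--         return nums[0]
-- ===== SOURCE B (Python) =====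
-- def minMaxGame(nums: list) -> int:
--     if len(nums) <= 1:
--         return nums[0]
--     new_nums = []
--     take_min = True
--     it = iter(nums)
--     for a, b in zip(it, it):  # successive pairs; a trailing odd element is dropped
--         new_nums.append(min(a, b) if take_min else max(a, b))
--         take_min = not take_min
--     return minMaxGame(new_nums)
-- ===== Notes on version B (the rewrite author's own statement) =====
-- stated objective: alternative
-- what changed: Replaces the index-based while loop (range(n//2) with i%2 parity tests) by a recursive game: each round walks successive pairs via a paired iterator with an alternating min/max toggle flag, then recurses on the shrunken list.
import Mathlib
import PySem

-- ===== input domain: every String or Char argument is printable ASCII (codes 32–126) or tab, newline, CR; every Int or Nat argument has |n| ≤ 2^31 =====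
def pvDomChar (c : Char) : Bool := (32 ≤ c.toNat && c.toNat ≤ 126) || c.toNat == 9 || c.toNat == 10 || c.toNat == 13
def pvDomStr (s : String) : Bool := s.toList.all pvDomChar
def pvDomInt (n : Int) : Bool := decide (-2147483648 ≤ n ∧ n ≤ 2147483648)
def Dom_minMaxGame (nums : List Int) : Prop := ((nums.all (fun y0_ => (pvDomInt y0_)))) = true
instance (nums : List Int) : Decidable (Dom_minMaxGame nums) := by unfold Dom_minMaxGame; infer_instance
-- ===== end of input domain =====

-- B replaces A's index-based while-loop rounds by recursion pattern-matching pairs with an alternating flag (alternative decomposition, same cost).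
-- Pre_ excludes only the empty list, on which A raises IndexError indexing the first element.


-- ===== PORT A =====
-- one while-loop round: for i in range(n//2): append min/max(nums[2i], nums[2i+1]) by parity of i
-- (indices 2i, 2i+1 are nonnegative and < n whenever i < n//2, so List.getD is exact for Python's nums[...])
def pvRoundA (xs : List Int) : List Int :=
  (List.range (xs.length / 2)).foldl
    (fun acc i =>
      acc ++ [if i % 2 == 0 then min (xs.getD (2 * i) 0) (xs.getD (2 * i + 1) 0)
              else max (xs.getD (2 * i) 0) (xs.getD (2 * i + 1) 0)])
    []

theorem pvFoldlAppendMap {α β : Type} (f : α → β) :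
    ∀ (l : List α) (acc : List β), l.foldl (fun a i => a ++ [f i]) acc = acc ++ l.map f := by
  intro l
  induction l with
  | nil => intro acc; simp
  | cons x xs ih => intro acc; simp [List.foldl, ih]

theorem pvRoundA_length (xs : List Int) : (pvRoundA xs).length = xs.length / 2 := by
  unfold pvRoundA
  rw [pvFoldlAppendMap]
  simp

-- the 'while len(nums) > 1' loop of A (first element at exit; Pre_ guarantees nonempty, so getD is exact)
def pvLoopA (xs : List Int) : Int :=
  if h : xs.length > 1 then pvLoopA (pvRoundA xs) else xs.getD 0 0
termination_by xs.length
decreasing_by rw [pvRoundA_length]; omega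

def minMaxGame (nums : List Int) : Int :=
  if nums.length == 1 then nums.getD 0 0 else pvLoopA nums

-- ===== PORT B =====
-- one round of B: peel pairs off the front, alternating min/max via the flag
def pvRoundB : List Int → Bool → List Int
  | a :: b :: rest, t => (if t then min a b else max a b) :: pvRoundB rest (!t)
  | _, _ => []

theorem pvRoundB_length : ∀ (xs : List Int) (t : Bool), (pvRoundB xs t).length = xs.length / 2
  | a :: b :: rest, t => by
      simp [pvRoundB, pvRoundB_length rest (!t)]
      omega
  | [], _ => by simp [pvRoundB]
  | [a], _ => by simp [pvRoundB]

def minMaxGame_alt (nums : List Int) : Int :=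
  if nums.length ≤ 1 then nums.getD 0 0
  else minMaxGame_alt (pvRoundB nums true)
termination_by nums.length
decreasing_by rw [pvRoundB_length]; omega

-- ===== PRECONDITION & SPEC =====
-- Pre_ excludes exactly the empty list, on which Python A raises IndexError indexing the first element
def Pre_minMaxGame (nums : List Int) : Prop := nums ≠ []
instance (nums : List Int) : Decidable (Pre_minMaxGame nums) := by unfold Pre_minMaxGame; infer_instance
def pvWitness_minMaxGame : List Int := ([1, 2, 3, 4] : List Int)

def Spec_minMaxGame (nums : List Int) (out : Int) : Prop := out = minMaxGame_alt nums
instance (nums : List Int) (out : Int) : Decidable (Spec_minMaxGame nums out) := by unfold Spec_minMaxGame; infer_instance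

-- ===== CLAIM (what is proved, stated in full; the proofs are below) =====
def Claim_equal_minMaxGame : Prop := ∀ (nums : List Int), Dom_minMaxGame nums → Pre_minMaxGame nums → Spec_minMaxGame nums (minMaxGame nums)

-- ===== LEMMAS AND PROOFS =====

-- the element B's round puts at position i, as a function of the flag and the parity of i
def pvSel (xs : List Int) (t : Bool) (i : Nat) : Int :=
  if (i % 2 == 0) == t then min (xs.getD (2 * i) 0) (xs.getD (2 * i + 1) 0)
  else max (xs.getD (2 * i) 0) (xs.getD (2 * i + 1) 0)

theorem pvRoundB_eq : ∀ (xs : List Int) (t : Bool),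
    pvRoundB xs t = (List.range (xs.length / 2)).map (pvSel xs t)
  | a :: b :: rest, t => by
      have hlen : (a :: b :: rest).length / 2 = rest.length / 2 + 1 := by simp; omega
      rw [pvRoundB, pvRoundB_eq rest (!t), hlen, List.range_succ_eq_map, List.map_cons,
        List.map_map]
      congr 1
      · simp [pvSel]
      · apply List.map_congr_left
        intro i _
        have hpar : (((i + 1) % 2 == 0) : Bool) = !(i % 2 == 0) := by
          rcases Nat.mod_two_eq_zero_or_one i with h | h <;> simp [Nat.add_mod, h]
        have hflag : ((!(i % 2 == 0)) == t) = ((i % 2 == 0) == !t) := by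
          cases t <;> cases h : (i % 2 == 0) <;> simp
        have h0 : (a :: b :: rest).getD (2 * (i + 1)) 0 = rest.getD (2 * i) 0 := by
          have e : 2 * (i + 1) = 2 * i + 1 + 1 := by omega
          simp [e]
        have h1 : (a :: b :: rest).getD (2 * (i + 1) + 1) 0 = rest.getD (2 * i + 1) 0 := by
          have e : 2 * (i + 1) + 1 = 2 * i + 1 + 1 + 1 := by omega
          simp [e]
        simp only [Function.comp, pvSel, Nat.succ_eq_add_one, hpar, hflag, h0, h1]
  | [], _ => by simp [pvRoundB]
  | [a], _ => by simp [pvRoundB]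

theorem pvRoundA_eq_roundB (xs : List Int) : pvRoundA xs = pvRoundB xs true := by
  rw [pvRoundB_eq, pvRoundA, pvFoldlAppendMap]
  simp only [List.nil_append]
  apply List.map_congr_left
  intro i _
  simp [pvSel]

theorem pvLoopA_eq_alt : ∀ (xs : List Int), pvLoopA xs = minMaxGame_alt xs
  | xs => by
      by_cases h : xs.length > 1
      · have hdec : (pvRoundB xs true).length < xs.length := by rw [pvRoundB_length]; omega
        have ih := pvLoopA_eq_alt (pvRoundB xs true)
        rw [pvLoopA, dif_pos h, pvRoundA_eq_roundB, ih]
        conv_rhs => rw [minMaxGame_alt]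
        rw [if_neg (show ¬ xs.length ≤ 1 by omega)]
      · rw [pvLoopA, dif_neg h]
        conv_rhs => rw [minMaxGame_alt]
        rw [if_pos (show xs.length ≤ 1 by omega)]
termination_by xs => xs.length
decreasing_by exact hdec

theorem pvMain (nums : List Int) : minMaxGame nums = minMaxGame_alt nums := by
  rw [minMaxGame]
  by_cases h : nums.length = 1
  · rw [if_pos (by simp [h]), minMaxGame_alt, if_pos (show nums.length ≤ 1 by omega)]
  · rw [if_neg (by simp [h]), pvLoopA_eq_alt]

-- ===== VERDICT (by name: the statement is the Claim_ definition above) =====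
theorem minMaxGame_spec : Claim_equal_minMaxGame := by
  intro nums _ _
  unfold Spec_minMaxGame
  exact pvMain nums
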